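-- pv_equiv track=rewrite | github.com/Valliento-Pranjalsharma/audit_app | main.py | get_unique_date_strings
-- ===== SOURCE A (Python) =====
-- IDX_TIMESTAMP = 2
--
-- def get_unique_date_strings(rows):
--     seen, out = set(), []
--     for r in rows:
--         date_part = r[IDX_TIMESTAMP].split(" ")[0] if r[IDX_TIMESTAMP] else ""
--         if date_part and date_part not in seen:
--             seen.add(date_part)
--             out.append(date_part)
--     return sorted(out, reverse=True)
-- ===== SOURCE B (Python) =====
-- IDX_TIMESTAMP = 2
--
-- def get_unique_date_strings(rows):
--     parts = []
--     for r in rows: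
--         ts = r[IDX_TIMESTAMP]
--         if ts:
--             p = ts.split(" ")[0]
--             if p:
--                 parts.append(p)
--     parts.sort(reverse=True)
--     result = []
--     for p in parts:
--         if not result or result[-1] != p:
--             result.append(p)
--     return result
-- ===== Notes on version B (the rewrite author's own statement) =====
-- stated objective: alternative
-- what changed: Replaces A's set-based first-occurrence dedup followed by a descending sort with a single flat collection pass, an in-place descending sort of all parts, and a final adjacent-duplicate-collapsing scan.
import Mathlib
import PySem

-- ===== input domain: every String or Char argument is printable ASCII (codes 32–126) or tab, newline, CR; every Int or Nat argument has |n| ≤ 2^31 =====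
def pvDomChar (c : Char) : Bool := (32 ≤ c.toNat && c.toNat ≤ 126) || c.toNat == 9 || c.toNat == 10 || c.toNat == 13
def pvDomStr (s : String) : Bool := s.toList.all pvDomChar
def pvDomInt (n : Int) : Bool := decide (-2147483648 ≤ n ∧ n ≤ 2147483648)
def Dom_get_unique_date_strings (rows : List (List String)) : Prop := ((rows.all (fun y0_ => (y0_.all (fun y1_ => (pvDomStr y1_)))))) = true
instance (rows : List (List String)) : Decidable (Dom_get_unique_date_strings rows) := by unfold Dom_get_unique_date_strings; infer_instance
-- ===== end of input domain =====

-- B collects all non-empty date parts in one pass, sorts them descending, then collapses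
-- adjacent duplicates — instead of A's set-based dedup followed by the descending sort.

-- ===== PORT A =====
-- date part of one row (r[2] is in range under Pre_): r[2].split(" ")[0] if r[2] else ""
def pvDatePart (r : List String) : String :=
  let ts := PySem.List.pyGetD r 2 ""
  if ts ≠ "" then PySem.List.pyGetD ((PySem.Str.split? ts " ").getD []) 0 "" else ""

def get_unique_date_strings (rows : List (List String)) : List String :=
  let st := rows.foldl (fun (st : PySem.Set String × List String) r =>
    let datePart := pvDatePart r
    if datePart ≠ "" ∧ ¬ (datePart ∈ st.1) then (PySem.Set.add st.1 datePart, st.2 ++ [datePart])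
    else st) (PySem.Set.empty, [])
  PySem.List.sorted st.2 (fun x => x) true

-- ===== PORT B =====
def get_unique_date_strings_alt (rows : List (List String)) : List String :=
  let parts := rows.foldl (fun acc r =>
    let ts := PySem.List.pyGetD r 2 ""
    if ts ≠ "" then
      let p := PySem.List.pyGetD ((PySem.Str.split? ts " ").getD []) 0 ""
      if p ≠ "" then acc ++ [p] else acc
    else acc) []
  let sortedParts := PySem.List.sorted parts (fun x => x) true
  sortedParts.foldl (fun res p =>
    if res = [] ∨ res.getLast? ≠ some p then res ++ [p] else res) []

-- ===== PRECONDITION & SPEC =====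
-- Pre_ excludes rows shorter than 3 entries, on which A raises IndexError at r[2].
def Pre_get_unique_date_strings (rows : List (List String)) : Prop :=
  ∀ r ∈ rows, 3 ≤ r.length
instance (rows : List (List String)) : Decidable (Pre_get_unique_date_strings rows) := by
  unfold Pre_get_unique_date_strings; infer_instance
def pvWitness_get_unique_date_strings : List (List String) :=
  [["a", "b", "2024-01-02 10:00"], ["c", "d", "2024-01-01 09:00"], ["e", "f", ""]]

def Spec_get_unique_date_strings (rows : List (List String)) (out : List String) : Prop :=
  out = get_unique_date_strings_alt rows
instance (rows : List (List String)) (out : List String) : Decidable (Spec_get_unique_date_strings rows out) := by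
  unfold Spec_get_unique_date_strings; infer_instance

-- ===== CLAIM (what is proved, stated in full; the proofs are below) =====
def Claim_equal_get_unique_date_strings : Prop := ∀ (rows : List (List String)), Dom_get_unique_date_strings rows → Pre_get_unique_date_strings rows → Spec_get_unique_date_strings rows (get_unique_date_strings rows)

-- ===== LEMMAS AND PROOFS =====

-- recursive form of B's collapsing loop
def pvCollapse (prev : Option String) : List String → List String
  | [] => []
  | p :: t => if some p = prev then pvCollapse prev t else p :: pvCollapse (some p) t

lemma pvCollapse_foldl (l : List String) : ∀ res : List String,
    l.foldl (fun res p => if res = [] ∨ res.getLast? ≠ some p then res ++ [p] else res) res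
      = res ++ pvCollapse res.getLast? l := by
  induction l with
  | nil => intro res; simp [pvCollapse]
  | cons p t ih =>
    intro res
    rw [List.foldl_cons]
    by_cases h : res.getLast? = some p
    · have hres : res ≠ [] := by rintro rfl; simp at h
      rw [if_neg (by simp [hres, h]), ih res]
      simp only [pvCollapse, if_pos h.symm]
    · rw [if_pos (Or.inr h), ih (res ++ [p])]
      simp only [pvCollapse, if_neg (fun hh : some p = res.getLast? => h hh.symm)]
      simp
lemma pvCollapse_spec (l : List String) : ∀ prev : Option String,
    l.Pairwise (· ≥ ·) → (∀ q, prev = some q → ∀ x ∈ l, q ≥ x) →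
    (pvCollapse prev l).Pairwise (fun a b => a > b) ∧
    (∀ x, x ∈ pvCollapse prev l ↔ x ∈ l ∧ prev ≠ some x) := by
  induction l with
  | nil => intro prev _ _; simp [pvCollapse]
  | cons p t ih =>
    intro prev hpw hbd
    have hpt : ∀ x ∈ t, p ≥ x := fun x hx => (List.pairwise_cons.mp hpw).1 x hx
    have htpw : t.Pairwise (· ≥ ·) := (List.pairwise_cons.mp hpw).2
    by_cases h : some p = prev
    · -- skip p
      have hbd' : ∀ q, prev = some q → ∀ x ∈ t, q ≥ x := by
        rintro q hq x hx
        rw [← h] at hq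
        injection hq with e
        exact e ▸ hpt x hx
      obtain ⟨hp1, hp2⟩ := ih prev htpw hbd'
      rw [pvCollapse, if_pos h]
      refine ⟨hp1, fun x => ?_⟩
      rw [hp2 x]
      constructor
      · rintro ⟨hx, hne⟩; exact ⟨List.mem_cons_of_mem _ hx, hne⟩
      · rintro ⟨hx, hne⟩
        rcases List.mem_cons.mp hx with rfl | hx
        · exact absurd h.symm hne
        · exact ⟨hx, hne⟩
    · -- keep p
      obtain ⟨hp1, hp2⟩ := ih (some p) htpw
        (fun q hq x hx => by injection hq with e; exact e ▸ hpt x hx)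
      rw [pvCollapse, if_neg h]
      constructor
      · refine List.pairwise_cons.mpr ⟨fun y hy => ?_, hp1⟩
        obtain ⟨hyt, hyne⟩ := (hp2 y).mp hy
        have : y ≠ p := fun e => hyne (by rw [e])
        exact lt_of_le_of_ne (hpt y hyt) this
      · intro x
        constructor
        · intro hx
          rcases List.mem_cons.mp hx with rfl | hx
          · exact ⟨List.mem_cons_self, fun e => h e.symm⟩
          · obtain ⟨hxt, hxne⟩ := (hp2 x).mp hx
            refine ⟨List.mem_cons_of_mem _ hxt, fun e => ?_⟩
            -- prev = some x with x ∈ t: then x ≥ p and p ≥ x, so x = p, contradicting prev ≠ some p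
            have h1 : x ≥ p := hbd x e p List.mem_cons_self
            have h2 : p ≥ x := hpt x hxt
            have : x = p := le_antisymm h2 h1
            exact h (by rw [← this, ← e])
        · rintro ⟨hx, hne⟩
          rcases List.mem_cons.mp hx with rfl | hxt
          · exact List.mem_cons_self
          · by_cases hxp : x = p
            · exact hxp ▸ List.mem_cons_self
            · exact List.mem_cons_of_mem _ ((hp2 x).mpr ⟨hxt, fun e => hxp (by injection e with e'; exact e'.symm)⟩)

-- A's accumulation loop: the out list stays duplicate-free, seen matches out,
-- and membership in out is membership among the non-empty date parts.
lemma pvAloop (rows : List (List String)) : ∀ st : PySem.Set String × List String,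
    (∀ x, x ∈ st.1 ↔ x ∈ st.2) → st.2.Nodup →
    let st' := rows.foldl (fun (st : PySem.Set String × List String) r =>
      let datePart := pvDatePart r
      if datePart ≠ "" ∧ ¬ (datePart ∈ st.1) then (PySem.Set.add st.1 datePart, st.2 ++ [datePart])
      else st) st
    (∀ x, x ∈ st'.1 ↔ x ∈ st'.2) ∧ st'.2.Nodup ∧
    (∀ x, x ∈ st'.2 ↔ x ∈ st.2 ∨ (∃ r ∈ rows, pvDatePart r = x ∧ x ≠ "")) := by
  induction rows with
  | nil => intro st h1 h2; exact ⟨h1, h2, by simp⟩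
  | cons r t ih =>
    intro st h1 h2
    simp only [List.foldl_cons]
    by_cases hc : pvDatePart r ≠ "" ∧ ¬ (pvDatePart r ∈ st.1)
    · rw [if_pos hc]
      have h1' : ∀ x, x ∈ PySem.Set.add st.1 (pvDatePart r) ↔ x ∈ st.2 ++ [pvDatePart r] := by
        intro x
        rw [PySem.Set.mem_add]
        simp only [List.mem_append, List.mem_singleton, h1 x]
      have h2' : (st.2 ++ [pvDatePart r]).Nodup := by
        refine List.Nodup.append h2 (List.nodup_singleton _) ?_
        intro x hx hx2
        rw [List.mem_singleton] at hx2
        exact hc.2 ((h1 _).mpr (hx2 ▸ hx))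
      obtain ⟨g1, g2, g3⟩ := ih (PySem.Set.add st.1 (pvDatePart r), st.2 ++ [pvDatePart r]) h1' h2'
      refine ⟨g1, g2, fun x => ?_⟩
      rw [g3 x]
      simp only [List.mem_append, List.mem_cons, List.not_mem_nil, or_false]
      constructor
      · rintro ((hx | rfl) | ⟨r', hr', hpr', hne⟩)
        · exact Or.inl hx
        · exact Or.inr ⟨r, Or.inl rfl, rfl, hc.1⟩
        · exact Or.inr ⟨r', Or.inr hr', hpr', hne⟩
      · rintro (hx | ⟨r', (rfl | hr'), hpr', hne⟩)
        · exact Or.inl (Or.inl hx)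
        · exact Or.inl (Or.inr hpr'.symm)
        · exact Or.inr ⟨r', hr', hpr', hne⟩
    · rw [if_neg hc]
      obtain ⟨g1, g2, g3⟩ := ih st h1 h2
      refine ⟨g1, g2, fun x => ?_⟩
      rw [g3 x]
      simp only [List.mem_cons]
      constructor
      · rintro (hx | ⟨r', hr', hpr', hne⟩)
        · exact Or.inl hx
        · exact Or.inr ⟨r', Or.inr hr', hpr', hne⟩
      · rintro (hx | ⟨r', (rfl | hr'), hpr', hne⟩)
        · exact Or.inl hx
        · -- the skipped case: part of r is "" or already seen (hence already in out)
          rcases not_and_or.mp hc with hne' | hseen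
          · exact absurd (hpr'.symm.trans (not_not.mp hne')) hne
          · exact Or.inl ((h1 x).mp (hpr' ▸ not_not.mp hseen))
        · exact Or.inr ⟨r', hr', hpr', hne⟩

-- B's collection loop: membership among the non-empty date parts.
lemma pvBloop (rows : List (List String)) : ∀ acc : List String,
    (∀ x, x ∈ rows.foldl (fun acc r =>
      let ts := PySem.List.pyGetD r 2 ""
      if ts ≠ "" then
        let p := PySem.List.pyGetD ((PySem.Str.split? ts " ").getD []) 0 ""
        if p ≠ "" then acc ++ [p] else acc
      else acc) acc ↔ x ∈ acc ∨ (∃ r ∈ rows, pvDatePart r = x ∧ x ≠ "")) := by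
  induction rows with
  | nil => intro acc x; simp
  | cons r t ih =>
    intro acc x
    simp only [List.foldl_cons]
    by_cases hts : PySem.List.pyGetD r 2 "" ≠ ""
    · by_cases hp : PySem.List.pyGetD ((PySem.Str.split? (PySem.List.pyGetD r 2 "") " ").getD []) 0 "" ≠ ""
      · rw [if_pos hts, if_pos hp, ih (acc ++ [_])]
        simp only [List.mem_append, List.mem_cons, List.not_mem_nil, or_false, pvDatePart]
        constructor
        · rintro ((hx | rfl) | ⟨r', hr', h', hne⟩)
          · exact Or.inl hx
          · exact Or.inr ⟨r, Or.inl rfl, by rw [if_pos hts], hp⟩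
          · exact Or.inr ⟨r', Or.inr hr', h', hne⟩
        · rintro (hx | ⟨r', (rfl | hr'), h', hne⟩)
          · exact Or.inl (Or.inl hx)
          · rw [if_pos hts] at h'; exact Or.inl (Or.inr h'.symm)
          · exact Or.inr ⟨r', hr', h', hne⟩
      · rw [if_pos hts, if_neg hp, ih acc]
        simp only [List.mem_cons, pvDatePart]
        constructor
        · rintro (hx | ⟨r', hr', h', hne⟩)
          · exact Or.inl hx
          · exact Or.inr ⟨r', Or.inr hr', h', hne⟩
        · rintro (hx | ⟨r', (rfl | hr'), h', hne⟩)
          · exact Or.inl hx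
          · rw [if_pos hts] at h'; exact absurd (h'.symm.trans (not_not.mp hp)) hne
          · exact Or.inr ⟨r', hr', h', hne⟩
    · rw [if_neg hts, ih acc]
      simp only [List.mem_cons, pvDatePart]
      constructor
      · rintro (hx | ⟨r', hr', h', hne⟩)
        · exact Or.inl hx
        · exact Or.inr ⟨r', Or.inr hr', h', hne⟩
      · rintro (hx | ⟨r', (rfl | hr'), h', hne⟩)
        · exact Or.inl hx
        · rw [if_neg hts] at h'; exact absurd h'.symm hne
        · exact Or.inr ⟨r', hr', h', hne⟩

-- ===== VERDICT (by name: the statement is the Claim_ definition above) =====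
theorem get_unique_date_strings_spec : Claim_equal_get_unique_date_strings := by
  intro rows _ _
  unfold Spec_get_unique_date_strings get_unique_date_strings get_unique_date_strings_alt
  simp only []
  -- names
  set out := (rows.foldl (fun (st : PySem.Set String × List String) r =>
      let datePart := pvDatePart r
      if datePart ≠ "" ∧ ¬ (datePart ∈ st.1) then (PySem.Set.add st.1 datePart, st.2 ++ [datePart])
      else st) (PySem.Set.empty, [])).2 with hout
  set parts := rows.foldl (fun acc r =>
      let ts := PySem.List.pyGetD r 2 ""
      if ts ≠ "" then
        let p := PySem.List.pyGetD ((PySem.Str.split? ts " ").getD []) 0 ""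
        if p ≠ "" then acc ++ [p] else acc
      else acc) [] with hparts
  obtain ⟨_, hnod, hmemA⟩ := pvAloop rows (PySem.Set.empty, []) (by simp [PySem.Set.empty]) List.nodup_nil
  have hmemB : ∀ x, x ∈ parts ↔ ∃ r ∈ rows, pvDatePart r = x ∧ x ≠ "" := by
    intro x; rw [hparts, pvBloop rows []]; simp
  set sp := PySem.List.sorted parts (fun x => x) true with hsp
  have hspw : sp.Pairwise (· ≥ ·) := by
    have := PySem.List.sorted_pairwise_rev parts (fun x => x)
    exact this.imp (fun h => h)
  obtain ⟨hcpw, hcmem⟩ := pvCollapse_spec sp none hspw (by rintro q ⟨⟩)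
  rw [pvCollapse_foldl sp []]
  simp only [List.nil_append, List.getLast?_nil]
  apply PySem.List.sorted_rev_eq_of_perm_of_pairwise_gt
  · -- pvCollapse none sp ~ out
    apply (List.perm_ext_iff_of_nodup (hcpw.imp (fun h => ne_of_gt h)) hnod).mpr
    intro x
    rw [hcmem x, hmemA x, PySem.List.mem_sorted, hmemB x]
    simp
  · exact hcpw
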